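-- pv_equiv track=rewrite | github.com/hkl690/Python_CodePath_Sessions | PythonPractice/Unit3sessions_Oct.py | process_elements
-- ===== SOURCE A (Python) =====
-- from collections import deque
-- from collections import deque
--
-- def process_elements(elements):
--     queue = deque()
--     stack = []
--
--     for element in elements:
--         queue.append(element)
--
--     while queue:
--         item = queue.popleft()
--         stack.append(item)
--
--         if len(stack) % 2 == 0 and queue:
--             stack.pop()
--     return list(stack)
-- ===== SOURCE B (Python) =====
-- def process_elements(elements):
--     lst = list(elements)
--     if not lst:
--         return []
--     if len(lst) == 1:
--         return [lst[0]]
--     return [lst[0], lst[-1]]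
-- ===== Notes on version B (the rewrite author's own statement) =====
-- stated objective: simpler
-- what changed: Replaced the simulated queue/stack pass (push each element, pop at even stack size while the queue is nonempty) with the closed form it computes: empty for empty input, just the first element for a singleton, otherwise the first and last elements.
import Mathlib
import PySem

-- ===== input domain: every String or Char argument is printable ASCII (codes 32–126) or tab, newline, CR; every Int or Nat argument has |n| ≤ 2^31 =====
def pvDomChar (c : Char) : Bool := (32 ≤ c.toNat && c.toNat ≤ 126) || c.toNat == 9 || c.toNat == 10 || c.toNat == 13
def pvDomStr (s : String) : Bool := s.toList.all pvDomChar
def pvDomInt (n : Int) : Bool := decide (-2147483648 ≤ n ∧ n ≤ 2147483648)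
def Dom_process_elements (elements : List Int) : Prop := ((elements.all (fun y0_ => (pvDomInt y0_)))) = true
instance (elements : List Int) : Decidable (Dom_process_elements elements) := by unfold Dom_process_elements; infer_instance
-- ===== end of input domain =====

-- B replaces A's simulated queue/stack pass with the closed form it computes
-- ([], [first], or [first, last]); objective: simpler.

-- ===== PORT A =====
-- the while-loop: queue as the remaining list, stack as the accumulator
def pvLoopA : List Int → List Int → List Int
  | [], stack => stack
  | q :: qs, stack =>
    let stack' := stack ++ [q]
    let stack'' := if stack'.length % 2 == 0 && !qs.isEmpty then stack'.dropLast else stack'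
    pvLoopA qs stack''

def process_elements (elements : List Int) : List Int :=
  pvLoopA elements []

-- ===== PORT B =====
def process_elements_alt (elements : List Int) : List Int :=
  match elements with
  | [] => []
  | [x] => [x]
  | x :: y :: rest => [x, (y :: rest).getLast (by simp)]

-- ===== PRECONDITION & SPEC =====
def Spec_process_elements (elements : List Int) (out : List Int) : Prop := out = process_elements_alt elements
instance (elements : List Int) (out : List Int) : Decidable (Spec_process_elements elements out) := by unfold Spec_process_elements; infer_instance

-- ===== CLAIM (what is proved, stated in full; the proofs are below) =====
def Claim_equal_process_elements : Prop := ∀ (elements : List Int), Dom_process_elements elements → Spec_process_elements elements (process_elements elements)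

-- ===== LEMMAS AND PROOFS =====
-- Invariant of A's loop: with a singleton stack [x] and a nonempty queue,
-- the loop pushes, hits even size, pops while more remain, and ends at [x, last].
theorem pvLoopA_singleton (q : Int) (qs : List Int) (x : Int) :
    pvLoopA (q :: qs) [x] = [x, (q :: qs).getLast (by simp)] := by
  induction qs generalizing q x with
  | nil => simp [pvLoopA]
  | cons q' qs' ih =>
    rw [pvLoopA]
    simp only [List.isEmpty_cons, List.length_append]
    norm_num
    rw [ih]

-- ===== VERDICT (by name: the statement is the Claim_ definition above) =====
theorem process_elements_spec : Claim_equal_process_elements := by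
  intro elements _
  unfold Spec_process_elements process_elements process_elements_alt
  match elements with
  | [] => rfl
  | [x] => rfl
  | x :: y :: rest =>
    have h1 : pvLoopA (x :: y :: rest) [] = pvLoopA (y :: rest) [x] := by
      simp [pvLoopA]
    rw [h1, pvLoopA_singleton]
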